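-- pv_equiv track=rewrite | github.com/rajaram-repo/bioinformatics-repo | Exercises/homework_1.py | fast_complement
-- ===== SOURCE A (Python) =====
-- def fast_complement(dna):
--     """
--     Uses a dictionary to convert a DNA sequence into the complement strand.  C <--> G,  T <--> A
--     :param dna: a string containing only the characters C, T, A, and G
--     :return: a string containing only the characters C, T, A, and G
--     """
--     str = ''
--     dict = {'C':'G','G':'C','A':'T','T':'A'}
--     for char in dna:
--         if char == 'C' or char == 'G' or char == 'T' or char == 'A':
--             str = str + dict[char]
--         else :
--             str = 'invalid character entered, please check the input'
--             break
--     return str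
-- ===== SOURCE B (Python) =====
-- def fast_complement(dna):
--     table = {'C': 'G', 'G': 'C', 'A': 'T', 'T': 'A'}
--     if all(c in table for c in dna):
--         return dna.translate(str.maketrans('CGAT', 'GCTA'))
--     return 'invalid character entered, please check the input'
-- ===== Notes on version B (the rewrite author's own statement) =====
-- stated objective: idiomatic
-- what changed: Replaces A's single interleaved loop that both validates and accumulates with a break sentinel by a validate-all pass followed by a one-shot str.translate transform.
import Mathlib
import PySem

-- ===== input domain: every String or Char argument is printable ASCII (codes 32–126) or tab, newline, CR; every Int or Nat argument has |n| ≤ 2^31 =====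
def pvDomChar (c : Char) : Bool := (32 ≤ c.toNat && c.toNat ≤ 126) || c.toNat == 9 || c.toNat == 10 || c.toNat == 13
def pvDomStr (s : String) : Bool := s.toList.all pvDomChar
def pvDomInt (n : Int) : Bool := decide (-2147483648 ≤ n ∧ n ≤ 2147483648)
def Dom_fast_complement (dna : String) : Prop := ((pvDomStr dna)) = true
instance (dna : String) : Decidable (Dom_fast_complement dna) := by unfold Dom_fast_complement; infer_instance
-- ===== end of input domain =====

-- B replaces A's interleaved validate-and-build loop (with break sentinel) by a
-- validate-all pass followed by a one-shot character translation (idiomatic).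


-- ===== PORT A =====
-- the dict {'C':'G','G':'C','A':'T','T':'A'} as a lookup on its four keys
def fcDict (c : Char) : Char :=
  if c = 'C' then 'G' else if c = 'G' then 'C' else if c = 'A' then 'T' else 'A'

-- A's for-loop: string accumulator, early break on an invalid character
def fcLoop : List Char → String → String
  | [], s => s
  | c :: rest, s =>
    if c = 'C' ∨ c = 'G' ∨ c = 'T' ∨ c = 'A' then fcLoop rest (s.push (fcDict c))
    else "invalid character entered, please check the input"

def fast_complement (dna : String) : String := fcLoop dna.toList ""

-- ===== PORT B =====
-- B: validate with one all() scan over the table's keys, then translate in one shot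
def fcValid (c : Char) : Bool := c == 'C' || c == 'G' || c == 'A' || c == 'T'

def fast_complement_alt (dna : String) : String :=
  if dna.toList.all fcValid then String.ofList (dna.toList.map fcDict)
  else "invalid character entered, please check the input"

-- ===== PRECONDITION & SPEC =====
def Spec_fast_complement (dna : String) (out : String) : Prop := out = fast_complement_alt dna
instance (dna : String) (out : String) : Decidable (Spec_fast_complement dna out) := by unfold Spec_fast_complement; infer_instance

-- ===== CLAIM (what is proved, stated in full; the proofs are below) =====
def Claim_equal_fast_complement : Prop := ∀ (dna : String), Dom_fast_complement dna → Spec_fast_complement dna (fast_complement dna)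

-- ===== LEMMAS AND PROOFS =====
theorem fcValid_iff (c : Char) :
    fcValid c = true ↔ (c = 'C' ∨ c = 'G' ∨ c = 'T' ∨ c = 'A') := by
  simp [fcValid]; tauto

theorem fcLoop_characterization (l : List Char) (s : String) :
    fcLoop l s = if l.all fcValid then String.ofList (s.toList ++ l.map fcDict)
                 else "invalid character entered, please check the input" := by
  induction l generalizing s with
  | nil => simp [fcLoop]
  | cons c rest ih =>
    simp only [fcLoop, List.all_cons, List.map_cons]
    by_cases h : c = 'C' ∨ c = 'G' ∨ c = 'T' ∨ c = 'A'
    · rw [if_pos h, ih, (fcValid_iff c).mpr h]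
      simp
    · rw [if_neg h, (Bool.not_eq_true _).mp (fun hv => h ((fcValid_iff c).mp hv))]
      simp

-- ===== VERDICT (by name: the statement is the Claim_ definition above) =====
theorem fast_complement_spec : Claim_equal_fast_complement := by
  intro dna _
  unfold Spec_fast_complement fast_complement fast_complement_alt
  rw [fcLoop_characterization]
  simp
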